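-- pv_equiv track=rewrite | github.com/shashjar/advent-of-code | 2024/day9/p2-solution.py | find_free_space
-- ===== SOURCE A (Python) =====
-- def find_free_space(memory, file_size, file_start_index):
--     start_index = -1
--     length = 0
--     for i, file_id in enumerate(memory):
--         if i >= file_start_index:
--             return None
--
--         if file_id == -1:
--             if start_index == -1:
--                 start_index = i
--             length += 1
--             if length == file_size:
--                 return start_index
--         else:
--             start_index = -1
--             length = 0
--
--     return None
-- ===== SOURCE B (Python) =====
-- def find_free_space(memory, file_size, file_start_index):
--     if file_size < 1:
--         return None
--     limit = min(len(memory), file_start_index)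
--     for start in range(limit - file_size + 1):
--         if all(cell == -1 for cell in memory[start:start + file_size]):
--             return start
--     return None
-- ===== Notes on version B (the rewrite author's own statement) =====
-- stated objective: alternative
-- what changed: Replaced A's single-pass running-run-length accumulator with a sliding-window search: for each candidate start below min(len(memory), file_start_index) - file_size + 1, check that the whole window is -1 and return the first passing start.
import Mathlib
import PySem

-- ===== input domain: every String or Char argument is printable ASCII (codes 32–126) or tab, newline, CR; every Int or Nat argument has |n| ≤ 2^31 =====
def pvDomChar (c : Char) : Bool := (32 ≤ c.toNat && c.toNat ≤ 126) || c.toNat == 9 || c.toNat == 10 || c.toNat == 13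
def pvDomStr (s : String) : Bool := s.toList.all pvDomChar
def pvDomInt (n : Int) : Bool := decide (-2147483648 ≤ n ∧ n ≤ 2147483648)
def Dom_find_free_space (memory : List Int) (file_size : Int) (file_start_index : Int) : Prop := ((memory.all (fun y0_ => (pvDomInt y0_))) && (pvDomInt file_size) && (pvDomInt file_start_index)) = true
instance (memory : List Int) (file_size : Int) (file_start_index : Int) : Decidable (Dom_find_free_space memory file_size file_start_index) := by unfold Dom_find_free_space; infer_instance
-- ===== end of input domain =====

-- B replaces A's single-pass run-length accumulator with a first-passing sliding-window
-- search over candidate starts (alternative decomposition, not claimed faster).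


-- ===== PORT A =====
-- loop over `enumerate(memory)` carrying (i, start_index, length); early returns become Option results
def findFreeA (fsz fsi : Int) : List Int → Int → Int → Int → Option Int
  | [], _, _, _ => none
  | c :: rest, i, si, len =>
    if fsi ≤ i then none
    else if c = -1 then
      let si' := if si = -1 then i else si
      if len + 1 = fsz then some si'
      else findFreeA fsz fsi rest (i + 1) si' (len + 1)
    else findFreeA fsz fsi rest (i + 1) (-1) 0

def find_free_space (memory : List Int) (file_size : Int) (file_start_index : Int) : Option Int :=
  findFreeA file_size file_start_index memory 0 (-1) 0

-- ===== PORT B =====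
-- all(cell == -1 for cell in memory[start:start+file_size])
def windowFree (memory : List Int) (fsz s : Int) : Bool :=
  (PySem.List.slice memory (some s) (some (s + fsz))).all (fun cell => cell == -1)

-- the for-loop over range(...) with an early return
def findFirstFree (memory : List Int) (fsz : Int) : List Int → Option Int
  | [] => none
  | s :: rest => if windowFree memory fsz s then some s else findFirstFree memory fsz rest

def find_free_space_alt (memory : List Int) (file_size : Int) (file_start_index : Int) : Option Int :=
  if file_size < 1 then none
  else
    let limit := min (memory.length : Int) file_start_index
    findFirstFree memory file_size (PySem.List.pyRange 0 (limit - file_size + 1) 1)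

-- ===== PRECONDITION & SPEC =====
def Spec_find_free_space (memory : List Int) (file_size : Int) (file_start_index : Int) (out : Option Int) : Prop := out = find_free_space_alt memory file_size file_start_index
instance (memory : List Int) (file_size : Int) (file_start_index : Int) (out : Option Int) : Decidable (Spec_find_free_space memory file_size file_start_index out) := by unfold Spec_find_free_space; infer_instance

-- ===== CLAIM (what is proved, stated in full; the proofs are below) =====
def Claim_equal_find_free_space : Prop := ∀ (memory : List Int) (file_size : Int) (file_start_index : Int), Dom_find_free_space memory file_size file_start_index → Spec_find_free_space memory file_size file_start_index (find_free_space memory file_size file_start_index)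

-- ===== LEMMAS AND PROOFS =====

-- A never matches a run when file_size ≤ 0 (length starts ≥ 0 and only grows before the test)
theorem findFreeA_nonpos (fsz fsi : Int) (h : fsz ≤ 0) :
    ∀ (xs : List Int) (i si len : Int), 0 ≤ len →
      findFreeA fsz fsi xs i si len = none := by
  intro xs
  induction xs with
  | nil => intro i si len _; rfl
  | cons c rest ih =>
    intro i si len hlen
    simp only [findFreeA]
    split
    · rfl
    · split
      · have : ¬ (len + 1 = fsz) := by omega
        simp only [this, if_false]
        exact ih _ _ _ (by omega)
      · exact ih _ _ _ le_rfl

-- windowFree unfolded on a Nat start and positive Int size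
theorem windowFree_eq (memory : List Int) (fsz : Int) (hfsz : 1 ≤ fsz) (s : Nat) :
    windowFree memory fsz (s : Int)
      = ((memory.drop s).take fsz.toNat).all (fun cell => cell == -1) := by
  unfold windowFree
  rw [PySem.List.slice_toNat memory (by omega) (by omega)]
  congr 2
  omega

-- the window at s is free when every cell of [s, s+fsz) is -1 and the window fits
theorem windowFree_of_all (memory : List Int) (fsz : Int) (hfsz : 1 ≤ fsz) (s : Nat)
    (hfit : s + fsz.toNat ≤ memory.length)
    (hall : ∀ j : Nat, s ≤ j → j < s + fsz.toNat → memory[j]? = some (-1)) :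
    windowFree memory fsz (s : Int) = true := by
  rw [windowFree_eq memory fsz hfsz s]
  rw [List.all_eq_true]
  intro x hx
  have hlen : ((memory.drop s).take fsz.toNat).length = fsz.toNat := by
    simp [List.length_take, List.length_drop]; omega
  obtain ⟨j, hj, hget⟩ := List.mem_iff_getElem.mp hx
  have hj' : j < fsz.toNat := by omega
  have : ((memory.drop s).take fsz.toNat)[j] = memory[s + j]'(by omega) := by
    simp [List.getElem_take, List.getElem_drop]
  have hx' : x = memory[s + j]'(by omega) := by rw [← hget, this]
  have hv : memory[s + j]'(by omega) = -1 := by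
    have := hall (s + j) (by omega) (by omega)
    rw [List.getElem?_eq_getElem (by omega)] at this
    injection this
  simp [hx', hv]

-- the window at s is NOT free when it contains a cell k with memory[k] ≠ -1
theorem windowFree_false (memory : List Int) (fsz : Int) (hfsz : 1 ≤ fsz) (s k : Nat) (c : Int)
    (hsk : s ≤ k) (hks : (k : Int) < (s : Int) + fsz) (hk : memory[k]? = some c) (hc : c ≠ -1) :
    windowFree memory fsz (s : Int) = false := by
  rw [windowFree_eq memory fsz hfsz s]
  have hklen : k < memory.length := by
    by_contra h
    rw [List.getElem?_eq_none (by omega)] at hk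
    simp at hk
  have hj : k - s < fsz.toNat := by omega
  rw [List.getElem?_eq_getElem hklen] at hk
  have hkval : memory[k] = c := by injection hk
  apply Bool.eq_false_iff.mpr
  intro hall
  rw [List.all_eq_true] at hall
  have hmem : memory[k] ∈ (memory.drop s).take fsz.toNat := by
    have : ((memory.drop s).take fsz.toNat)[k - s]'(by
        simp [List.length_take, List.length_drop]; omega) = memory[k] := by
      simp [List.getElem_take, List.getElem_drop]
      congr 1
      omega
    rw [← this]
    exact List.getElem_mem _
  have := hall _ hmem
  rw [hkval] at this
  simp at this
  exact hc this

-- skipping a prefix of failing candidate starts does not change the search result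
theorem findFirstFree_skip (memory : List Int) (fsz : Int) :
    ∀ (n : Nat) (a U : Int),
      (∀ s : Int, a ≤ s → s < a + n → windowFree memory fsz s = false) →
      findFirstFree memory fsz (PySem.List.pyRange a U 1)
        = findFirstFree memory fsz (PySem.List.pyRange (a + n) U 1) := by
  intro n
  induction n with
  | zero => intro a U _; norm_num
  | succ m ih =>
    intro a U hfail
    by_cases hU : U ≤ a
    · rw [PySem.List.pyRange_one_eq_nil hU, PySem.List.pyRange_one_eq_nil (by omega)]
    · rw [PySem.List.pyRange_one_cons (by omega)]
      simp only [findFirstFree]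
      rw [hfail a le_rfl (by omega)]
      simp only [Bool.false_eq_true, if_false]
      have := ih (a + 1) U (fun s hs1 hs2 => hfail s (by omega) (by omega))
      rw [this]
      have harg : a + 1 + ((m : Nat) : Int) = a + (((m + 1 : Nat)) : Int) := by push_cast; ring
      rw [harg]

-- CORE: A's scan from position k with a current free run of length r (occupying [k-r, k))
-- equals B's first-free-window search over the candidate starts from k-r upward.
theorem core (fsz fsi : Int) (hfsz : 1 ≤ fsz) :
    ∀ (xs : List Int) (memory : List Int) (k r : Nat),
      xs = memory.drop k →
      r ≤ k →
      (r : Int) < fsz →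
      (∀ j : Nat, k - r ≤ j → j < k → memory[j]? = some (-1)) →
      findFreeA fsz fsi xs (k : Int) (if r = 0 then -1 else ((k - r : Nat) : Int)) (r : Int)
        = findFirstFree memory fsz
            (PySem.List.pyRange ((k - r : Nat) : Int) (min (memory.length : Int) fsi - fsz + 1) 1) := by
  intro xs
  induction xs with
  | nil =>
    intro memory k r hxs hrk hrf _
    have hlen : memory.length ≤ k := by
      have := congrArg List.length hxs
      simp [List.length_drop] at this
      omega
    have : min (memory.length : Int) fsi - fsz + 1 ≤ ((k - r : Nat) : Int) := by
      have h1 : min (memory.length : Int) fsi ≤ (memory.length : Int) := min_le_left _ _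
      omega
    rw [PySem.List.pyRange_one_eq_nil this]
    rfl
  | cons c rest ih =>
    intro memory k r hxs hrk hrf hall
    have hk : memory[k]? = some c := by
      have : (memory.drop k)[0]? = some c := by rw [← hxs]; rfl
      rw [List.getElem?_drop] at this
      simpa using this
    have hklen : k < memory.length := by
      by_contra h
      rw [List.getElem?_eq_none (by omega)] at hk
      simp at hk
    have hrest : rest = memory.drop (k + 1) := by
      have : (memory.drop k).tail = memory.drop (k + 1) := by
        rw [List.tail_drop]
      rw [← hxs] at this
      simpa using this
    simp only [findFreeA]
    by_cases hstop : fsi ≤ (k : Int)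
    · simp only [hstop, if_true]
      have : min (memory.length : Int) fsi - fsz + 1 ≤ ((k - r : Nat) : Int) := by
        have h1 : min (memory.length : Int) fsi ≤ fsi := min_le_right _ _
        omega
      rw [PySem.List.pyRange_one_eq_nil this]
      rfl
    · simp only [hstop, if_false]
      by_cases hc : c = -1
      · simp only [hc, if_true]
        have hsi : (if (if r = 0 then (-1 : Int) else ((k - r : Nat) : Int)) = -1 then (k : Int)
            else (if r = 0 then (-1 : Int) else ((k - r : Nat) : Int))) = ((k - r : Nat) : Int) := by
          by_cases hr0 : r = 0
          · simp [hr0]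
          · have : ((k - r : Nat) : Int) ≠ -1 := by have := Int.natCast_nonneg (k - r); omega
            simp [hr0, this]
        rw [hsi]
        by_cases hdone : (r : Int) + 1 = fsz
        · simp only [hdone, if_true]
          -- the window at k-r passes: cells [k-r, k] are all -1
          have hfit : (k - r) + fsz.toNat ≤ memory.length := by omega
          have hfree : windowFree memory fsz ((k - r : Nat) : Int) = true := by
            apply windowFree_of_all memory fsz hfsz (k - r) hfit
            intro j hj1 hj2
            by_cases hjk : j < k
            · exact hall j hj1 hjk
            · have : j = k := by omega
              rw [this, hk, hc]
          have hlt : ((k - r : Nat) : Int) < min (memory.length : Int) fsi - fsz + 1 := by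
            have h1 : (k : Int) + 1 ≤ (memory.length : Int) := by exact_mod_cast hklen
            have h2 : (k : Int) + 1 ≤ fsi := by omega
            have : (k : Int) + 1 ≤ min (memory.length : Int) fsi := le_min h1 h2
            omega
          rw [PySem.List.pyRange_one_cons hlt]
          simp only [findFirstFree, hfree, if_true]
        · simp only [hdone, if_false]
          have := ih memory (k + 1) (r + 1) hrest (by omega) (by omega)
            (by
              intro j hj1 hj2
              by_cases hjk : j < k
              · exact hall j (by omega) hjk
              · have : j = k := by omega
                rw [this, hk, hc])
          have heq1 : ((k + 1 - (r + 1) : Nat) : Int) = ((k - r : Nat) : Int) := by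
            congr 1
            omega
          have heq2 : (((r : Nat) + 1 : Nat) : Int) = (r : Int) + 1 := by push_cast; ring
          simp only [heq1, heq2] at this
          rw [show ((k : Int) + 1) = (((k + 1 : Nat)) : Int) by push_cast; ring]
          rw [if_neg (Nat.succ_ne_zero r)] at this
          exact this
      · simp only [hc, if_false]
        have := ih memory (k + 1) 0 hrest (by omega) (by omega) (by intro j h1 h2; omega)
        simp only [Nat.sub_zero, Nat.cast_zero, if_true] at this
        rw [show ((k : Int) + 1) = (((k + 1 : Nat)) : Int) by push_cast; ring]
        rw [this]
        -- every start in [k-r, k+1) fails: its window contains cell k, which is c ≠ -1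
        have hskip := findFirstFree_skip memory fsz (r + 1) ((k - r : Nat) : Int)
          (min (memory.length : Int) fsi - fsz + 1)
          (by
            intro s hs1 hs2
            have hs0 : 0 ≤ s := le_trans (Int.natCast_nonneg _) hs1
            obtain ⟨sn, rfl⟩ := Int.eq_ofNat_of_zero_le hs0
            apply windowFree_false memory fsz hfsz sn k c
            · -- sn ≤ k
              have : (sn : Int) < ((k - r : Nat) : Int) + (r + 1) := hs2
              push_cast at this ⊢
              omega
            · -- k < sn + fsz
              have : ((k - r : Nat) : Int) ≤ (sn : Int) := hs1
              push_cast at this ⊢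
              omega
            · exact hk
            · exact hc)
        rw [hskip]
        have harg : ((k - r : Nat) : Int) + (((r + 1 : Nat)) : Int) = (((k + 1 : Nat)) : Int) := by omega
        rw [harg]

-- ===== VERDICT (by name: the statement is the Claim_ definition above) =====
theorem find_free_space_spec : Claim_equal_find_free_space := by
  intro memory fsz fsi _
  unfold Spec_find_free_space find_free_space find_free_space_alt
  by_cases hfsz : fsz < 1
  · simp only [hfsz, if_true]
    exact findFreeA_nonpos fsz fsi (by omega) memory 0 (-1) 0 le_rfl
  · simp only [hfsz, if_false]
    have := core fsz fsi (by omega) memory memory 0 0 rfl le_rfl (by omega) (by intro j h1 h2; omega)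
    simpa using this
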